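-- pv_equiv track=rewrite | github.com/T-Srikanth/DSML | A16.py | k_occur
-- ===== SOURCE A (Python) =====
-- def k_occur(A,B):
--   mod = 1000000007
--   n=len(A)
--   a_dict = {}
--   res = 0
--   for i in range(n):
--     if A[i] in a_dict:
--       a_dict[A[i]] += 1
--     else:
--       a_dict[A[i]] = 1
--   for k,v in a_dict.items():
--     if v == B:
--       res += k
--       res %= mod
--   return -1 if res==0 else res
-- ===== SOURCE B (Python) =====
-- def k_occur(A, B):
--     # sort-and-group scan instead of a dict tally; mod applied once at the end
--     s = sorted(A)
--     res = 0
--     i = 0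
--     n = len(s)
--     while i < n:
--         j = i + 1
--         while j < n and s[j] == s[i]:
--             j += 1
--         if j - i == B:
--             res += s[i]
--         i = j
--     res %= 1000000007
--     return -1 if res == 0 else res
-- ===== Notes on version B (the rewrite author's own statement) =====
-- stated objective: alternative
-- what changed: Replaces the dict tally plus items scan by sorting a copy and doing one run-length group scan over the sorted list, applying the modulus once at the end instead of after each addition.
import Mathlib
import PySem

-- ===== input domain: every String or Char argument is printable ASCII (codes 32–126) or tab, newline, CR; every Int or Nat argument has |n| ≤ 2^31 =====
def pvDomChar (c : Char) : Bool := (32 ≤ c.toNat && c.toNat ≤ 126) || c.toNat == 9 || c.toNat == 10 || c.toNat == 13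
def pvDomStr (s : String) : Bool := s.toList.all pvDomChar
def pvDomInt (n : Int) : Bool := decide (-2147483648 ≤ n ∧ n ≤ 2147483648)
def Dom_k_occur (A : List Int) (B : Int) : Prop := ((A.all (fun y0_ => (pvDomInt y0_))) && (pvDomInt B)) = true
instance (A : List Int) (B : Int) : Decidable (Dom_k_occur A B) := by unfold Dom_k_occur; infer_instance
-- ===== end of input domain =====

-- B replaces A's dict tally by a sort + run-length group scan with a single final modulus (alternative decomposition, not claimed faster).

-- ===== PORT A =====
def k_occur (A : List Int) (B : Int) : Int :=
  let m : Int := 1000000007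
  let n : Int := (A.length : Int)
  let d : PySem.Dict Int Int :=
    (PySem.List.pyRange 0 n 1).foldl
      (fun d i =>
        -- A[i]; every i in range(n) is in range, so the default is never used
        let x := PySem.List.pyGetD A i 0
        if d.contains x then d.modify x 0 (· + 1) else d.insert x 1)
      PySem.Dict.empty
  let res : Int :=
    d.items.foldl (fun res kv => if kv.2 = B then PySem.Int.mod (res + kv.1) m else res) 0
  if res = 0 then -1 else res

-- ===== PORT B =====
-- outer while loop of Source B: one step per run of equal values in the sorted list
def kOccurGroups (B : Int) (res : Int) (s : List Int) : Int :=
  match s with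
  | [] => res
  | v :: rest =>
    -- inner while loop: j - i = 1 + length of the block of copies of v after position i
    let run : Int := 1 + ((rest.takeWhile (fun x => x == v)).length : Int)
    kOccurGroups B (if run = B then res + v else res) (rest.dropWhile (fun x => x == v))
termination_by s.length
decreasing_by
  simp only [List.length_cons]
  have := List.length_dropWhile_le (fun x => x == v) rest
  omega

def k_occur_alt (A : List Int) (B : Int) : Int :=
  let s := PySem.List.sorted A (fun x => x) false
  let res := PySem.Int.mod (kOccurGroups B 0 s) 1000000007
  if res = 0 then -1 else res

-- ===== PRECONDITION & SPEC =====
def Spec_k_occur (A : List Int) (B : Int) (out : Int) : Prop := out = k_occur_alt A B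
instance (A : List Int) (B : Int) (out : Int) : Decidable (Spec_k_occur A B out) := by unfold Spec_k_occur; infer_instance

-- ===== CLAIM (what is proved, stated in full; the proofs are below) =====
def Claim_equal_k_occur : Prop := ∀ (A : List Int) (B : Int), Dom_k_occur A B → Spec_k_occur A B (k_occur A B)

-- ===== LEMMAS AND PROOFS =====

-- A's second loop: fold of add-then-mod equals mod of the sum
lemma foldl_mod_sum (B : Int) (l : List (Int × Int)) (r : Int) (hr : r % 1000000007 = r) :
    l.foldl (fun res kv => if kv.2 = B then (res + kv.1) % 1000000007 else res) r
      = (r + (l.map (fun kv => if kv.2 = B then kv.1 else 0)).sum) % 1000000007 := by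
  induction l generalizing r with
  | nil => simpa using hr.symm
  | cons kv t ih =>
    simp only [List.foldl_cons, List.map_cons, List.sum_cons]
    by_cases h : kv.2 = B
    · rw [if_pos h, if_pos h, ih _ (Int.emod_emod_of_dvd _ dvd_rfl), Int.emod_add_emod]
      ring_nf
    · rw [if_neg h, if_neg h, ih _ hr, zero_add]

-- A's first loop is Counter(A)
lemma count_loop_eq_counter (A : List Int) :
    A.foldl (fun d x => if d.contains x then d.modify x 0 (· + 1) else d.insert x 1)
      PySem.Dict.empty = PySem.Dict.counter A := by
  rw [PySem.Dict.counter_eq_foldl]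
  apply PySem.List.foldl_congr_mem
  intro d x _
  by_cases h : d.contains x
  · simp [h]
  · have h' : d.contains x = false := by simpa using h
    simp [PySem.Dict.modify, PySem.Dict.getD_of_not_contains _ _ h']

-- head of a non-empty dropWhile fails the predicate
lemma dropWhile_cons_head_false {p : Int → Bool} : ∀ (l : List Int) {d0 : Int} {dtl : List Int},
    l.dropWhile p = d0 :: dtl → p d0 = false := by
  intro l
  induction l with
  | nil => intro d0 dtl h; simp at h
  | cons a l ih =>
    intro d0 dtl h
    by_cases hp : p a
    · rw [List.dropWhile_cons_of_pos hp] at h; exact ih h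
    · rw [List.dropWhile_cons_of_neg hp] at h
      cases h
      simpa using hp

-- B's grouped scan over a sorted list sums the values whose multiplicity is B
lemma kOccurGroups_eq (B : Int) (n : Nat) : ∀ (s : List Int), s.length ≤ n →
    s.Pairwise (· ≤ ·) → ∀ r : Int,
    kOccurGroups B r s = r + ∑ v ∈ s.toFinset, (if (s.count v : Int) = B then v else 0) := by
  induction n with
  | zero =>
    intro s hs _ r
    have hnil : s = [] := List.eq_nil_of_length_eq_zero (Nat.le_zero.mp hs)
    subst hnil; simp [kOccurGroups]
  | succ n ih =>
    intro s hs hp r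
    match s, hs, hp with
    | [], _, _ => simp [kOccurGroups]
    | v :: rest, hs, hp =>
      have hvle : ∀ x ∈ rest, v ≤ x := (List.pairwise_cons.mp hp).1
      have hrest : rest.Pairwise (· ≤ ·) := (List.pairwise_cons.mp hp).2
      set t := rest.takeWhile (fun x => x == v) with ht
      set w := rest.dropWhile (fun x => x == v) with hw
      have htw : t ++ w = rest := List.takeWhile_append_dropWhile
      have htv : ∀ x ∈ t, x = v := fun x hx => by
        have := List.mem_takeWhile_imp hx; simpa using this
      have hwsub : w.Sublist rest := by rw [hw]; exact List.dropWhile_sublist _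
      have hwp : w.Pairwise (· ≤ ·) := List.Pairwise.sublist hwsub hrest
      have hvw : v ∉ w := by
        intro hv
        have hne : w ≠ [] := List.ne_nil_of_mem hv
        obtain ⟨d0, dtl, hww⟩ := List.exists_cons_of_ne_nil hne
        have hd0 : (d0 == v) = false := dropWhile_cons_head_false (p := fun x => x == v) rest (by rw [← hw]; exact hww)
        have hd0v : d0 ≠ v := by simpa using hd0
        have hd0w : d0 ∈ w := by rw [hww]; simp
        have hd0rest : d0 ∈ rest := hwsub.subset hd0w
        rcases List.mem_cons.mp (hww ▸ hv) with h | h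
        · exact hd0v h.symm
        · have hwp' : (d0 :: dtl).Pairwise (· ≤ ·) := hww ▸ hwp
          have h1 : d0 ≤ v := (List.pairwise_cons.mp hwp').1 v h
          exact hd0v (le_antisymm h1 (hvle d0 hd0rest))
      have hcv : (v :: rest).count v = t.length + 1 := by
        rw [List.count_cons_self, ← htw, List.count_append]
        rw [List.count_eq_length.mpr (fun b hb => (htv b hb).symm),
            List.count_eq_zero.mpr hvw]
      have hcw : ∀ x ∈ w, (v :: rest).count x = w.count x := by
        intro x hx
        have hxv : x ≠ v := fun h => hvw (h ▸ hx)
        have hvx : v ≠ x := Ne.symm hxv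
        rw [← htw, List.count_cons, List.count_append,
            List.count_eq_zero.mpr (fun hxt => hxv (htv x hxt))]
        simp [hvx]
      have hfin : (v :: rest).toFinset = insert v w.toFinset := by
        ext x
        simp only [List.toFinset_cons, Finset.mem_insert, List.mem_toFinset, ← htw,
          List.mem_append]
        constructor
        · rintro (rfl | h | h)
          · exact Or.inl rfl
          · exact Or.inl (htv x h)
          · exact Or.inr h
        · rintro (rfl | h)
          · exact Or.inl rfl
          · exact Or.inr (Or.inr h)
      have hvwf : v ∉ w.toFinset := by simpa using hvw
      have hlw : w.length ≤ n := by
        have h1 := hwsub.length_le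
        have h2 : (v :: rest).length ≤ n + 1 := hs
        simp only [List.length_cons] at h2
        omega
      rw [kOccurGroups, ← ht, ← hw, ih w hlw hwp]
      rw [hfin, Finset.sum_insert hvwf]
      have hcond : ((((v :: rest).count v : Nat)) : Int) = 1 + (t.length : Int) := by
        rw [hcv]; push_cast; ring
      rw [hcond]
      have hsum : (∑ x ∈ w.toFinset, (if (((v :: rest).count x : Nat) : Int) = B then x else 0))
          = ∑ x ∈ w.toFinset, (if ((w.count x : Nat) : Int) = B then x else 0) :=
        Finset.sum_congr rfl (fun x hx => by rw [hcw x (List.mem_toFinset.mp hx)])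
      rw [hsum]
      split_ifs <;> ring

-- assembling both sides to the same closed form
lemma k_occur_eq (A : List Int) (B : Int) : k_occur A B = k_occur_alt A B := by
  have hm : ∀ a : Int, PySem.Int.mod a 1000000007 = a % 1000000007 :=
    fun a => PySem.Int.mod_eq_emod_of_pos (by norm_num)
  have hA : k_occur A B =
      if (∑ v ∈ A.toFinset, (if (A.count v : Int) = B then v else 0)) % 1000000007 = 0
      then -1
      else (∑ v ∈ A.toFinset, (if (A.count v : Int) = B then v else 0)) % 1000000007 := by
    simp only [k_occur, hm]
    have hd : (List.foldl
        (fun d i =>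
          if (PySem.Dict.contains d (PySem.List.pyGetD A i 0)) = true then
            PySem.Dict.modify d (PySem.List.pyGetD A i 0) 0 (fun x => x + 1)
          else PySem.Dict.insert d (PySem.List.pyGetD A i 0) 1)
        (PySem.Dict.empty : PySem.Dict Int Int) (PySem.List.pyRange 0 (A.length : Int) 1))
          = PySem.Dict.counter A :=
      (PySem.List.foldl_pyRange_zero_pyGetD' A 0
        (fun (d : PySem.Dict Int Int) (x : Int) =>
          if d.contains x then d.modify x 0 (· + 1) else d.insert x 1)
        PySem.Dict.empty).trans (count_loop_eq_counter A)
    rw [hd, PySem.Dict.items_counter, foldl_mod_sum B _ 0 (by decide), List.map_map]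
    have hof : (PySem.Set.ofList A).toFinset = A.toFinset := by
      ext x; simp [PySem.Set.mem_ofList]
    rw [← List.sum_toFinset _ (PySem.Set.nodup_ofList A), hof, zero_add]
    simp [Function.comp]
  have hps : (PySem.List.sorted A (fun x => x) false).Pairwise (· ≤ ·) := by
    simpa using PySem.List.sorted_pairwise A (fun x => x)
  have hB : k_occur_alt A B =
      if (∑ v ∈ A.toFinset, (if (A.count v : Int) = B then v else 0)) % 1000000007 = 0
      then -1
      else (∑ v ∈ A.toFinset, (if (A.count v : Int) = B then v else 0)) % 1000000007 := by
    simp only [k_occur_alt, hm]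
    rw [kOccurGroups_eq B (PySem.List.sorted A (fun x => x) false).length _ le_rfl hps 0,
        zero_add]
    have h1 : (PySem.List.sorted A (fun x => x) false).toFinset = A.toFinset := by
      ext x; simp [PySem.List.mem_sorted]
    have h2 : ∀ v : Int, (PySem.List.sorted A (fun x => x) false).count v = A.count v :=
      (PySem.List.sorted_perm A (fun x => x) false).count_eq
    rw [h1, Finset.sum_congr rfl (fun x _ => by rw [h2 x])]
  rw [hA, hB]

-- ===== VERDICT (by name: the statement is the Claim_ definition above) =====
theorem k_occur_spec : Claim_equal_k_occur := by
  intro A B _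
  unfold Spec_k_occur
  exact k_occur_eq A B
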